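-- pv_equiv track=rewrite | github.com/shaaista/kebo | services/ticketing_agent_service.py | _expand_semantic_tokens
-- ===== SOURCE A (Python) =====
-- _SEMANTIC_TOPIC_ALIASES: dict[str, set[str]] = {
--     "book": {"booking", "book", "reserve", "reservation", "arrange", "schedule", "request"},
--     "table": {"table", "restaurant", "dining", "reservation"},
--     "room": {"room", "suite", "stay", "checkin", "checkout", "check", "accommodation"},
--     "spa": {"spa", "massage", "therapy", "wellness", "treatment"},
--     "transport": {"transport", "cab", "taxi", "airport", "pickup", "drop", "ride", "shuttle", "chauffeur", "transfer"},
--     "food": {"food", "meal", "dish", "menu", "dining", "dessert"},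
--     "human": {"human", "agent", "handoff", "escalation", "escalate", "manager", "staff", "callback"},
--     "complaint": {"complaint", "issue", "problem", "maintenance", "broken", "notwork", "dirty", "cockroach"},
-- }
--
-- def _expand_semantic_tokens(tokens: set[str]) -> set[str]:
--     expanded = set(tokens)
--     if not expanded:
--         return expanded
--     for canonical, aliases in _SEMANTIC_TOPIC_ALIASES.items():
--         if canonical in expanded or any(alias in expanded for alias in aliases):
--             expanded.add(canonical)
--     return expanded
-- ===== SOURCE B (Python) =====
-- # B: reverse index alias -> canonicals, built once; expansion iterates the input
-- # tokens instead of scanning the whole alias table per call.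
--
-- _ALIAS_TO_CANONICALS: dict[str, frozenset[str]] = {
--     "booking": frozenset({"book"}),
--     "book": frozenset({"book"}),
--     "reserve": frozenset({"book"}),
--     "reservation": frozenset({"book", "table"}),
--     "arrange": frozenset({"book"}),
--     "schedule": frozenset({"book"}),
--     "request": frozenset({"book"}),
--     "table": frozenset({"table"}),
--     "restaurant": frozenset({"table"}),
--     "dining": frozenset({"table", "food"}),
--     "room": frozenset({"room"}),
--     "suite": frozenset({"room"}),
--     "stay": frozenset({"room"}),
--     "checkin": frozenset({"room"}),
--     "checkout": frozenset({"room"}),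
--     "check": frozenset({"room"}),
--     "accommodation": frozenset({"room"}),
--     "spa": frozenset({"spa"}),
--     "massage": frozenset({"spa"}),
--     "therapy": frozenset({"spa"}),
--     "wellness": frozenset({"spa"}),
--     "treatment": frozenset({"spa"}),
--     "transport": frozenset({"transport"}),
--     "cab": frozenset({"transport"}),
--     "taxi": frozenset({"transport"}),
--     "airport": frozenset({"transport"}),
--     "pickup": frozenset({"transport"}),
--     "drop": frozenset({"transport"}),
--     "ride": frozenset({"transport"}),
--     "shuttle": frozenset({"transport"}),
--     "chauffeur": frozenset({"transport"}),
--     "transfer": frozenset({"transport"}),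
--     "food": frozenset({"food"}),
--     "meal": frozenset({"food"}),
--     "dish": frozenset({"food"}),
--     "menu": frozenset({"food"}),
--     "dessert": frozenset({"food"}),
--     "human": frozenset({"human"}),
--     "agent": frozenset({"human"}),
--     "handoff": frozenset({"human"}),
--     "escalation": frozenset({"human"}),
--     "escalate": frozenset({"human"}),
--     "manager": frozenset({"human"}),
--     "staff": frozenset({"human"}),
--     "callback": frozenset({"human"}),
--     "complaint": frozenset({"complaint"}),
--     "issue": frozenset({"complaint"}),
--     "problem": frozenset({"complaint"}),
--     "maintenance": frozenset({"complaint"}),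
--     "broken": frozenset({"complaint"}),
--     "notwork": frozenset({"complaint"}),
--     "dirty": frozenset({"complaint"}),
--     "cockroach": frozenset({"complaint"}),
-- }
--
-- _NOTHING: frozenset[str] = frozenset()
--
--
-- def _expand_semantic_tokens(tokens: set[str]) -> set[str]:
--     triggered: set[str] = set()
--     for tok in tokens:
--         triggered |= _ALIAS_TO_CANONICALS.get(tok, _NOTHING)
--     return set(tokens) | triggered
-- ===== Notes on version B (the rewrite author's own statement) =====
-- stated objective: alternative
-- what changed: Replaces the per-call scan of the whole canonical->aliases table (with an any() over each alias set) by a precomputed reverse index alias->canonicals and a single loop over the input tokens that unions the triggered canonicals.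
import Mathlib
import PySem

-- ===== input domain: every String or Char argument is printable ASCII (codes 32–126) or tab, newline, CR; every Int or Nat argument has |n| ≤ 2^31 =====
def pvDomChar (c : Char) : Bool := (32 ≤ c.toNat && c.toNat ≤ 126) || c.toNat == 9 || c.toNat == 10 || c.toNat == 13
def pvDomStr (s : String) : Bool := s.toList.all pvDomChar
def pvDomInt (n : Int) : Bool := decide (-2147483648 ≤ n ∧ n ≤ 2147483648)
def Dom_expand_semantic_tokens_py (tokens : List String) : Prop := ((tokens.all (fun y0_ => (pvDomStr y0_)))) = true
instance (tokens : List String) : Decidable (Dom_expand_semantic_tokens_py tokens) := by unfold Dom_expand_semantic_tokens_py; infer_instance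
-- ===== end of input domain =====

-- B replaces A's per-call scan of the whole canonical->aliases table by a precomputed
-- reverse index alias->canonicals and a single loop over the input tokens (objective:
-- alternative; same asymptotic cost). Sets are returned; element order is a port choice.


-- ===== PORT A =====
-- _SEMANTIC_TOPIC_ALIASES: dict canonical -> set of aliases, in insertion order
-- (the alias sets are only consumed by membership tests, so their order is irrelevant).
def pyAliasTable : List (String × List String) :=
  [("book", ["booking", "book", "reserve", "reservation", "arrange", "schedule", "request"]),
   ("table", ["table", "restaurant", "dining", "reservation"]),
   ("room", ["room", "suite", "stay", "checkin", "checkout", "check", "accommodation"]),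
   ("spa", ["spa", "massage", "therapy", "wellness", "treatment"]),
   ("transport", ["transport", "cab", "taxi", "airport", "pickup", "drop", "ride", "shuttle", "chauffeur", "transfer"]),
   ("food", ["food", "meal", "dish", "menu", "dining", "dessert"]),
   ("human", ["human", "agent", "handoff", "escalation", "escalate", "manager", "staff", "callback"]),
   ("complaint", ["complaint", "issue", "problem", "maintenance", "broken", "notwork", "dirty", "cockroach"])]

def expand_semantic_tokens_py (tokens : List String) : List String :=
  let expanded : PySem.Set String := PySem.Set.ofList tokens
  if expanded = [] then expanded
  else
    pyAliasTable.foldl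
      (fun e p =>
        if PySem.Set.contains e p.1 || p.2.any (fun a => PySem.Set.contains e a)
        then PySem.Set.add e p.1 else e)
      expanded

-- ===== PORT B =====
-- _ALIAS_TO_CANONICALS: the literal reverse index of Source B, alias -> canonicals.
def pyRev : PySem.Dict String (List String) :=
  PySem.Dict.mk
  [("booking", ["book"]), ("book", ["book"]), ("reserve", ["book"]),
   ("reservation", ["book", "table"]), ("arrange", ["book"]), ("schedule", ["book"]),
   ("request", ["book"]),
   ("table", ["table"]), ("restaurant", ["table"]), ("dining", ["table", "food"]),
   ("room", ["room"]), ("suite", ["room"]), ("stay", ["room"]), ("checkin", ["room"]),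
   ("checkout", ["room"]), ("check", ["room"]), ("accommodation", ["room"]),
   ("spa", ["spa"]), ("massage", ["spa"]), ("therapy", ["spa"]), ("wellness", ["spa"]),
   ("treatment", ["spa"]),
   ("transport", ["transport"]), ("cab", ["transport"]), ("taxi", ["transport"]),
   ("airport", ["transport"]), ("pickup", ["transport"]), ("drop", ["transport"]),
   ("ride", ["transport"]), ("shuttle", ["transport"]), ("chauffeur", ["transport"]),
   ("transfer", ["transport"]),
   ("food", ["food"]), ("meal", ["food"]), ("dish", ["food"]), ("menu", ["food"]),
   ("dessert", ["food"]),
   ("human", ["human"]), ("agent", ["human"]), ("handoff", ["human"]),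
   ("escalation", ["human"]), ("escalate", ["human"]), ("manager", ["human"]),
   ("staff", ["human"]), ("callback", ["human"]),
   ("complaint", ["complaint"]), ("issue", ["complaint"]), ("problem", ["complaint"]),
   ("maintenance", ["complaint"]), ("broken", ["complaint"]), ("notwork", ["complaint"]),
   ("dirty", ["complaint"]), ("cockroach", ["complaint"])]

-- the universe of canonicals (every element `triggered` can ever hold)
def pyCanons : List String :=
  ["book", "table", "room", "spa", "transport", "food", "human", "complaint"]

def expand_semantic_tokens_py_alt (tokens : List String) : List String :=
  -- triggered = set(); for tok in tokens: triggered |= rev.get(tok, frozenset())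
  let triggered : PySem.Set String :=
    tokens.foldl (fun acc tok => PySem.Set.update acc (PySem.Dict.getD pyRev tok []))
      PySem.Set.empty
  -- return set(tokens) | triggered — a set union; a Python set is unordered, so the
  -- port emits the union's new elements in the fixed canonical order (triggered ⊆ pyCanons).
  pyCanons.foldl
    (fun e c => if PySem.Set.contains triggered c then PySem.Set.add e c else e)
    (PySem.Set.ofList tokens)

-- ===== PRECONDITION & SPEC =====
def Spec_expand_semantic_tokens_py (tokens : List String) (out : List String) : Prop := out = expand_semantic_tokens_py_alt tokens
instance (tokens : List String) (out : List String) : Decidable (Spec_expand_semantic_tokens_py tokens out) := by unfold Spec_expand_semantic_tokens_py; infer_instance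

-- ===== CLAIM (what is proved, stated in full; the proofs are below) =====
def Claim_equal_expand_semantic_tokens_py : Prop := ∀ (tokens : List String), Dom_expand_semantic_tokens_py tokens → Spec_expand_semantic_tokens_py tokens (expand_semantic_tokens_py tokens)

-- ===== LEMMAS AND PROOFS =====

-- membership in B's `triggered` accumulator
lemma mem_triggered (tokens : List String) (acc : PySem.Set String) (x : String) :
    (x ∈ tokens.foldl (fun acc tok => PySem.Set.update acc (PySem.Dict.getD pyRev tok [])) acc)
    ↔ x ∈ acc ∨ ∃ t ∈ tokens, x ∈ PySem.Dict.getD pyRev t [] := by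
  induction tokens generalizing acc with
  | nil => simp
  | cons t ts ih =>
    simp only [List.foldl_cons, ih, PySem.Set.mem_update, List.mem_cons]
    constructor
    · rintro (⟨h | h⟩ | ⟨u, hu, hx⟩)
      · exact Or.inl h
      · exact Or.inr ⟨t, Or.inl rfl, h⟩
      · exact Or.inr ⟨u, Or.inr hu, hx⟩
    · rintro (h | ⟨u, (rfl | hu), hx⟩)
      · exact Or.inl (Or.inl h)
      · exact Or.inl (Or.inr hx)
      · exact Or.inr ⟨u, hu, hx⟩

-- the reverse index is correct w.r.t. A's table
set_option maxHeartbeats 1000000 in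
lemma rev_correct (tok : String) :
    ∀ p ∈ pyAliasTable, (p.1 ∈ PySem.Dict.getD pyRev tok [] ↔ tok ∈ p.2) := by
  by_cases htok : tok ∈ pyRev.keys
  · simp only [pyRev, PySem.Dict.keys_mk, List.map_cons, List.map_nil, List.mem_cons,
      List.not_mem_nil, or_false] at htok
    rcases htok with rfl|rfl|rfl|rfl|rfl|rfl|rfl|rfl|rfl|rfl|rfl|rfl|rfl|rfl|rfl|rfl|rfl|rfl|rfl|rfl|rfl|rfl|rfl|rfl|rfl|rfl|rfl|rfl|rfl|rfl|rfl|rfl|rfl|rfl|rfl|rfl|rfl|rfl|rfl|rfl|rfl|rfl|rfl|rfl|rfl|rfl|rfl|rfl|rfl|rfl|rfl|rfl|rfl <;> decide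
  · intro p hp
    rw [PySem.Dict.getD_eq_get?_getD,
      (PySem.Dict.get?_eq_none_iff_not_mem_keys pyRev tok).mpr htok]
    simp only [Option.getD_none, List.not_mem_nil, false_iff]
    intro h2
    exact htok ((show ∀ q ∈ pyAliasTable, ∀ a ∈ q.2, a ∈ pyRev.keys by decide) p hp tok h2)

-- both folds add the same canonicals: A tests the evolving set, B tests `triggered`;
-- they agree because no canonical is an alias (or the name) of a later canonical.
lemma fold_congr (trigSet : PySem.Set String) (tokens : List String) :
    ∀ (tbl : List (String × List String)) (e extra : List String),
      (∀ x, x ∈ e ↔ x ∈ tokens ∨ x ∈ extra) →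
      (∀ x ∈ extra, ∀ p ∈ tbl, x ≠ p.1 ∧ x ∉ p.2) →
      (∀ p ∈ tbl, p.1 ∈ p.2) →
      (∀ p ∈ tbl, (PySem.Set.contains trigSet p.1 = true ↔ ∃ a ∈ p.2, a ∈ tokens)) →
      List.Pairwise (fun p q => p.1 ≠ q.1 ∧ p.1 ∉ q.2) tbl →
      tbl.foldl
        (fun e p =>
          if PySem.Set.contains e p.1 || p.2.any (fun a => PySem.Set.contains e a)
          then PySem.Set.add e p.1 else e) e
      = (tbl.map Prod.fst).foldl
          (fun e c => if PySem.Set.contains trigSet c then PySem.Set.add e c else e) e := by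
  intro tbl
  induction tbl with
  | nil => intro e extra _ _ _ _ _; rfl
  | cons p rest ih =>
    intro e extra he hextra hself htrig hpw
    have hce : ∀ x : String, PySem.Set.contains e x = true ↔ x ∈ e := fun x => by simp [pysem]
    have hextra' : ∀ x ∈ extra, ∀ q ∈ rest, x ≠ q.1 ∧ x ∉ q.2 :=
      fun x hx q hq => hextra x hx q (List.mem_cons_of_mem _ hq)
    have hself' : ∀ q ∈ rest, q.1 ∈ q.2 := fun q hq => hself q (List.mem_cons_of_mem _ hq)
    have htrig' : ∀ q ∈ rest, (PySem.Set.contains trigSet q.1 = true ↔ ∃ a ∈ q.2, a ∈ tokens) :=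
      fun q hq => htrig q (List.mem_cons_of_mem _ hq)
    cases ht : PySem.Set.contains trigSet p.1 with
    | false =>
      have hcond : (PySem.Set.contains e p.1 || p.2.any (fun a => PySem.Set.contains e a))
          = false := by
        rw [Bool.or_eq_false_iff]
        refine ⟨?_, ?_⟩
        · rw [Bool.eq_false_iff]
          intro hc
          rw [hce, he] at hc
          rcases hc with hc | hc
          · exact Bool.eq_false_iff.mp ht ((htrig p List.mem_cons_self).mpr
              ⟨p.1, hself p List.mem_cons_self, hc⟩)
          · exact (hextra p.1 hc p List.mem_cons_self).1 rfl
        · rw [Bool.eq_false_iff]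
          intro hany
          rw [List.any_eq_true] at hany
          obtain ⟨a, ha, hc⟩ := hany
          rw [hce, he] at hc
          rcases hc with hc | hc
          · exact Bool.eq_false_iff.mp ht ((htrig p List.mem_cons_self).mpr ⟨a, ha, hc⟩)
          · exact (hextra a hc p List.mem_cons_self).2 ha
      simp only [List.map_cons, List.foldl_cons, hcond, ht, Bool.false_eq_true, if_false]
      exact ih e extra he hextra' hself' htrig' hpw.of_cons
    | true =>
      have hcond : (PySem.Set.contains e p.1 || p.2.any (fun a => PySem.Set.contains e a))
          = true := by
        rw [Bool.or_eq_true, List.any_eq_true]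
        obtain ⟨a, ha, hatok⟩ := (htrig p List.mem_cons_self).mp ht
        exact Or.inr ⟨a, ha, (hce a).mpr ((he a).mpr (Or.inl hatok))⟩
      simp only [List.map_cons, List.foldl_cons, hcond, ht, if_true]
      refine ih (PySem.Set.add e p.1) (extra ++ [p.1]) ?_ ?_ hself' htrig' hpw.of_cons
      · intro x
        rw [PySem.Set.mem_add, he]
        simp [List.mem_append]
        tauto
      · intro x hx q hq
        rcases List.mem_append.mp hx with hx | hx
        · exact hextra' x hx q hq
        · rcases List.mem_singleton.mp hx with rfl
          exact (List.pairwise_cons.mp hpw).1 q hq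

-- characterisation of `triggered` membership for the canonicals of the table
lemma trig_spec (tokens : List String) (p : String × List String) (hp : p ∈ pyAliasTable) :
    (PySem.Set.contains
        (tokens.foldl (fun acc tok => PySem.Set.update acc (PySem.Dict.getD pyRev tok []))
          PySem.Set.empty) p.1 = true)
    ↔ ∃ a ∈ p.2, a ∈ tokens := by
  have hc : ∀ (s : PySem.Set String) (x : String), PySem.Set.contains s x = true ↔ x ∈ s :=
    fun s x => by simp [pysem]
  rw [hc, mem_triggered]
  simp only [PySem.Set.empty, List.not_mem_nil, false_or]
  constructor
  · rintro ⟨t, ht, hx⟩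
    exact ⟨t, (rev_correct t p hp).mp hx, ht⟩
  · rintro ⟨a, ha, hat⟩
    exact ⟨a, hat, (rev_correct a p hp).mpr ha⟩

-- ===== VERDICT (by name: the statement is the Claim_ definition above) =====
theorem expand_semantic_tokens_py_spec : Claim_equal_expand_semantic_tokens_py := by
  intro tokens _
  unfold Spec_expand_semantic_tokens_py expand_semantic_tokens_py expand_semantic_tokens_py_alt
  rcases tokens with _ | ⟨t, ts⟩
  · decide
  have hne : PySem.Set.ofList (t :: ts) ≠ [] := by
    rw [PySem.Set.ofList_cons]; exact List.cons_ne_nil _ _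
  rw [if_neg hne]
  have hmap : pyAliasTable.map Prod.fst = pyCanons := by decide
  rw [← hmap]
  exact fold_congr _ (t :: ts) pyAliasTable (PySem.Set.ofList (t :: ts)) []
    (fun x => by simp [PySem.Set.mem_ofList])
    (by simp)
    (by decide)
    (fun p hp => trig_spec (t :: ts) p hp)
    (by decide)
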